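-- pv_equiv track=rewrite | github.com/Hemedi18/afya-AI | AI_brain/views.py | _normalize_question_items
-- ===== SOURCE A (Python) =====
-- def _normalize_question_items(items):
-- 	"""Merge split fragments so each checkbox item is a complete question."""
-- 	def _question_key(text):
-- 		return ' '.join((text or '').strip().lower().rstrip('?.!,;:').split())
--
-- 	normalized = []
-- 	buffer = ""
--
-- 	for raw in (items or []):
-- 		text = (raw or '').strip().lstrip('-•0123456789. ').strip()
-- 		if not text:
-- 			continue
--
-- 		if buffer:
-- 			buffer = f"{buffer} {text}".strip()
-- 		else:
-- 			buffer = text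
--
-- 		if buffer.endswith('?'):
-- 			normalized.append(buffer)
-- 			buffer = ""
--
-- 	if buffer:
-- 		# Ensure last fragment still becomes a complete question
-- 		normalized.append(buffer.rstrip(' .,:;!') + '?')
--
-- 	# De-duplicate with canonical key
-- 	result = []
-- 	seen = set()
-- 	for q in normalized:
-- 		key = _question_key(q)
-- 		if key and key not in seen:
-- 			seen.add(key)
-- 			result.append(q)
-- 	return result
-- ===== SOURCE B (Python) =====
-- def _normalize_question_items(items):
-- 	"""Merge split fragments so each checkbox item is a complete question."""
-- 	def _clean(raw):
-- 		return (raw or '').strip().lstrip('-\u2022' '0123456789. ').strip()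
--
-- 	def _complete(fs):
-- 		# split off the group ending at the first '?'-terminated fragment, recurse on the rest
-- 		if not fs:
-- 			return []
-- 		i = 0
-- 		while i < len(fs) and not fs[i].endswith('?'):
-- 			i += 1
-- 		if i == len(fs):
-- 			return [' '.join(fs).rstrip(' .,:;!') + '?']
-- 		return [' '.join(fs[:i + 1])] + _complete(fs[i + 1:])
--
-- 	fragments = [t for t in map(_clean, items or []) if t]
-- 	dedup = {}
-- 	for q in _complete(fragments):
-- 		key = ' '.join(q.strip().lower().rstrip('?.!,;:').split())
-- 		if key and key not in dedup:
-- 			dedup[key] = q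
-- 	return list(dedup.values())
-- ===== Notes on version B (the rewrite author's own statement) =====
-- stated objective: alternative
-- what changed: Replaces A's stateful buffer loop (accumulate fragments, flush on '?') by a pure recursion that cuts the cleaned fragment list at each first '?'-terminated fragment and joins each group once, and replaces the seen-set/result-list dedup pair by a single insertion-ordered dict keyed by the canonical key.
import Mathlib
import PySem

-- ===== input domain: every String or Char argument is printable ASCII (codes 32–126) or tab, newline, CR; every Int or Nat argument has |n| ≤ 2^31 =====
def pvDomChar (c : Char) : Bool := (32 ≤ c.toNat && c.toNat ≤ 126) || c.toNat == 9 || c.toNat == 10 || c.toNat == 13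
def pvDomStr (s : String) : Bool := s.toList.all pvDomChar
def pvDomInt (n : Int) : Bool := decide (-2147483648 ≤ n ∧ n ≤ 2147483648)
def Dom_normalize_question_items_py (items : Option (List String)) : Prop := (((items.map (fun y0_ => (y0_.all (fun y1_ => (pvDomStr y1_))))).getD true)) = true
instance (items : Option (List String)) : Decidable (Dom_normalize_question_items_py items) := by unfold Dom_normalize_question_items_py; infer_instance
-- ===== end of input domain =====

-- B replaces A's stateful buffer loop by a pure recursion cutting the cleaned fragment list at
-- each first '?'-terminated fragment and joining each group once, and A's seen-set/result-list
-- pair by one insertion-ordered dict (objective: alternative decomposition).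

-- shared helpers: both Pythons contain the identical cleaning and canonical-key expressions
-- str.lstrip(chars) / str.rstrip(chars): exact — drop leading/trailing chars from the given set
def pvLstripChars (cs chars : List Char) : List Char := cs.dropWhile (chars.contains ·)
def pvRstripChars (cs chars : List Char) : List Char := (cs.reverse.dropWhile (chars.contains ·)).reverse
def pvLeadChars : List Char := "-•0123456789. ".toList
def pvTailChars : List Char := " .,:;!".toList
def pvKeyChars : List Char := "?.!,;:".toList
-- (raw or '').strip().lstrip('-•0123456789. ').strip()
def pvClean (raw : String) : List Char :=
  PySem.Chars.strip (pvLstripChars (PySem.Chars.strip raw.toList) pvLeadChars)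
-- ' '.join((text or '').strip().lower().rstrip('?.!,;:').split())
def pvKey (q : List Char) : List Char :=
  PySem.Chars.join [' '] (PySem.Chars.split₀ (pvRstripChars (PySem.Chars.lower (PySem.Chars.strip q)) pvKeyChars))

-- ===== PORT A =====
def pvStepA (st : List (List Char) × List Char) (raw : String) : List (List Char) × List Char :=
  let text := pvClean raw
  if text = [] then st
  else
    let buffer := if st.2 ≠ [] then PySem.Chars.strip (st.2 ++ ' ' :: text) else text
    if PySem.Chars.endswith buffer ['?'] then (st.1 ++ [buffer], []) else (st.1, buffer)

def pvDedupA (st : List (List Char) × PySem.Set (List Char)) (q : List Char) :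
    List (List Char) × PySem.Set (List Char) :=
  let key := pvKey q
  if key ≠ [] ∧ st.2.contains key = false then (st.1 ++ [q], st.2.add key) else st

def normalize_question_items_py (items : Option (List String)) : List String :=
  let st := (items.getD []).foldl pvStepA ([], [])
  let normalized := if st.2 ≠ [] then st.1 ++ [pvRstripChars st.2 pvTailChars ++ ['?']] else st.1
  let res := normalized.foldl pvDedupA ([], PySem.Set.empty)
  res.1.map String.ofList

-- ===== PORT B =====
-- scan to the first '?'-terminated fragment, join that group, recurse on the remainder
def pvComplete (fs : List (List Char)) : List (List Char) :=
  match h : fs.dropWhile (fun t => !PySem.Chars.endswith t ['?']) with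
  | [] =>
      if fs = [] then []
      else [pvRstripChars (PySem.Chars.join [' '] fs) pvTailChars ++ ['?']]
  | q :: rest =>
      PySem.Chars.join [' '] (fs.takeWhile (fun t => !PySem.Chars.endswith t ['?']) ++ [q])
        :: pvComplete rest
termination_by fs.length
decreasing_by
  have hs : (q :: rest).Sublist fs := h ▸ List.dropWhile_sublist _
  have := hs.length_le
  simp at this; omega

def pvDedupB (d : PySem.Dict (List Char) (List Char)) (q : List Char) :
    PySem.Dict (List Char) (List Char) :=
  let key := pvKey q
  if key ≠ [] ∧ d.contains key = false then d.insert key q else d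

def normalize_question_items_py_alt (items : Option (List String)) : List String :=
  let fragments := ((items.getD []).map pvClean).filter (fun t => t ≠ [])
  let dedup := (pvComplete fragments).foldl pvDedupB PySem.Dict.empty
  dedup.values.map String.ofList

-- ===== PRECONDITION & SPEC =====
def Spec_normalize_question_items_py (items : Option (List String)) (out : List String) : Prop := out = normalize_question_items_py_alt items
instance (items : Option (List String)) (out : List String) : Decidable (Spec_normalize_question_items_py items out) := by unfold Spec_normalize_question_items_py; infer_instance

-- ===== CLAIM (what is proved, stated in full; the proofs are below) =====
def Claim_equal_normalize_question_items_py : Prop := ∀ (items : Option (List String)), Dom_normalize_question_items_py items → Spec_normalize_question_items_py items (normalize_question_items_py items)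

-- ===== LEMMAS AND PROOFS =====

-- A's loop body on an already-cleaned nonempty fragment, and the final-buffer flush
def pvStepM (st : List (List Char) × List Char) (text : List Char) : List (List Char) × List Char :=
  let buffer := if st.2 ≠ [] then PySem.Chars.strip (st.2 ++ ' ' :: text) else text
  if PySem.Chars.endswith buffer ['?'] then (st.1 ++ [buffer], []) else (st.1, buffer)

def pvFinish (st : List (List Char) × List Char) : List (List Char) :=
  if st.2 ≠ [] then st.1 ++ [pvRstripChars st.2 pvTailChars ++ ['?']] else st.1

-- strip-fixedness, split into the two sides
def pvGoodL (t : List Char) : Prop := t.dropWhile PySem.Chars.isspace = t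
def pvGoodR (t : List Char) : Prop := t.reverse.dropWhile PySem.Chars.isspace = t.reverse

theorem pvGoodL_prefix {y l : List Char} (hy : pvGoodL y) (h : l <+: y) : pvGoodL l := by
  unfold pvGoodL at *
  rw [List.dropWhile_eq_self_iff] at *
  intro hl
  have := h.getElem (i := 0) hl
  rw [this]
  exact hy (lt_of_lt_of_le hl h.length_le)

theorem pvGoodL_strip (x : List Char) : pvGoodL (PySem.Chars.strip x) := by
  have hy : pvGoodL (x.dropWhile PySem.Chars.isspace) := List.dropWhile_idempotent _ _
  apply pvGoodL_prefix hy
  have := List.dropWhile_suffix (l := (x.dropWhile PySem.Chars.isspace).reverse) PySem.Chars.isspace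
  rw [← List.reverse_prefix] at this
  simpa [PySem.Chars.strip, PySem.Chars.rstrip, PySem.Chars.lstrip] using this

theorem pvGoodR_strip (x : List Char) : pvGoodR (PySem.Chars.strip x) := by
  simp [pvGoodR, PySem.Chars.strip, PySem.Chars.rstrip, PySem.Chars.lstrip,
    List.dropWhile_idempotent]

theorem pvStrip_eq_self {t : List Char} (hL : pvGoodL t) (hR : pvGoodR t) :
    PySem.Chars.strip t = t := by
  unfold pvGoodL pvGoodR at *
  simp [PySem.Chars.strip, PySem.Chars.rstrip, PySem.Chars.lstrip, hL, hR]

theorem pvGoodL_append {a : List Char} (s : List Char) (hL : pvGoodL a) (ha : a ≠ []) :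
    pvGoodL (a ++ s) := by
  unfold pvGoodL at *
  rw [List.dropWhile_eq_self_iff] at *
  intro hl
  have h0 : 0 < a.length := List.length_pos_iff.mpr ha
  rw [List.getElem_append_left h0]
  exact hL h0

theorem pvGoodR_append {c : List Char} (s : List Char) (hR : pvGoodR c) (hc : c ≠ []) :
    pvGoodR (s ++ c) := by
  unfold pvGoodR at *
  rw [List.reverse_append]
  exact pvGoodL_append _ hR (by simpa using hc)

theorem pvSuffix_singleton_concat (l : List Char) (c x : Char) :
    ([x] <:+ l ++ [c]) ↔ x = c := by
  constructor
  · rintro ⟨u, hu⟩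
    have := congrArg (List.getLast? ·) hu
    simpa using this
  · rintro rfl; exact ⟨l, rfl⟩

-- the last-character test ignores a prefix
theorem pvEndswith_append (a : List Char) {t : List Char} (ht : t ≠ []) :
    PySem.Chars.endswith (a ++ t) ['?'] = PySem.Chars.endswith t ['?'] := by
  rcases (List.eq_nil_or_concat t) with h | ⟨t', c, rfl⟩
  · exact absurd h ht
  rw [Bool.eq_iff_iff]
  rw [PySem.Chars.endswith_iff, PySem.Chars.endswith_iff]
  rw [List.concat_eq_append, ← List.append_assoc]
  rw [pvSuffix_singleton_concat, pvSuffix_singleton_concat]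

-- ' '.join over a merged first pair
theorem pvJoin_merge (b t : List Char) (l : List (List Char)) :
    PySem.Chars.join [' '] ((b ++ ' ' :: t) :: l) = b ++ ' ' :: PySem.Chars.join [' '] (t :: l) := by
  cases l with
  | nil => simp [PySem.Chars.join_singleton]
  | cons y l => simp [PySem.Chars.join_cons_cons]

theorem pvComplete_nil : pvComplete [] = [] := by
  rw [pvComplete]; split
  · simp
  · next q rest h => simp at h

theorem pvComplete_cons_pos {t : List Char} (rest : List (List Char))
    (h : PySem.Chars.endswith t ['?'] = true) :
    pvComplete (t :: rest) = t :: pvComplete rest := by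
  rw [pvComplete]; split
  · next h' => rw [List.dropWhile_cons] at h'; simp [h] at h'
  · next q r h' =>
      rw [List.dropWhile_cons] at h'
      simp only [h, Bool.not_true] at h'
      simp at h'
      obtain ⟨rfl, rfl⟩ := h'
      simp [h, PySem.Chars.join_singleton]

theorem pvComplete_single_neg {b : List Char}
    (hb : PySem.Chars.endswith b ['?'] = false) :
    pvComplete [b] = [pvRstripChars (PySem.Chars.join [' '] [b]) pvTailChars ++ ['?']] := by
  rw [pvComplete]; split
  · simp [PySem.Chars.join_singleton]
  · next q r h' => simp [hb] at h'

theorem pvComplete_cons_neg_pos {b t : List Char} (rest : List (List Char))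
    (hb : PySem.Chars.endswith b ['?'] = false) (ht : PySem.Chars.endswith t ['?'] = true) :
    pvComplete (b :: t :: rest) = PySem.Chars.join [' '] [b, t] :: pvComplete rest := by
  rw [pvComplete]; split
  · next h' => simp [hb, ht] at h'
  · next q r h' =>
      simp only [List.dropWhile_cons, hb, ht] at h'
      simp at h'
      obtain ⟨rfl, rfl⟩ := h'
      simp [hb, ht]

theorem pvComplete_cons_neg {b : List Char} (rest : List (List Char))
    (hb : PySem.Chars.endswith b ['?'] = false) :
    pvComplete (b :: rest) =
      match rest.dropWhile (fun t => !PySem.Chars.endswith t ['?']) with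
      | [] => [pvRstripChars (PySem.Chars.join [' '] (b :: rest)) pvTailChars ++ ['?']]
      | q :: r =>
          PySem.Chars.join [' ']
            (b :: (rest.takeWhile (fun t => !PySem.Chars.endswith t ['?']) ++ [q])) :: pvComplete r := by
  rw [pvComplete]
  split
  · next h1 =>
      rw [List.dropWhile_cons] at h1
      simp only [hb, Bool.not_false, if_pos] at h1
      rw [h1]
      simp
  · next q r h1 =>
      rw [List.dropWhile_cons] at h1
      simp only [hb, Bool.not_false, if_pos] at h1
      rw [h1]
      simp [List.takeWhile_cons, hb]

theorem pvComplete_merge {b t : List Char} (rest : List (List Char))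
    (hb : PySem.Chars.endswith b ['?'] = false) (ht : PySem.Chars.endswith t ['?'] = false)
    (hbt : PySem.Chars.endswith (b ++ ' ' :: t) ['?'] = false) :
    pvComplete ((b ++ ' ' :: t) :: rest) = pvComplete (b :: t :: rest) := by
  rw [pvComplete_cons_neg rest hbt, pvComplete_cons_neg (t :: rest) hb]
  rw [List.dropWhile_cons, List.takeWhile_cons]
  simp only [ht, Bool.not_false, if_pos]
  cases hr : rest.dropWhile (fun t => !PySem.Chars.endswith t ['?']) with
  | nil => simp [pvJoin_merge, PySem.Chars.join_cons_cons]
  | cons q r => simp [pvJoin_merge, PySem.Chars.join_cons_cons]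

-- A's loop over the raw items is the same fold over the cleaned nonempty fragments
theorem pvFoldA_eq (l : List String) (st : List (List Char) × List Char) :
    l.foldl pvStepA st = ((l.map pvClean).filter (fun t => t ≠ [])).foldl pvStepM st := by
  induction l generalizing st with
  | nil => rfl
  | cons raw l ih =>
      by_cases h : pvClean raw = []
      · simp [pvStepA, pvStepM, h, ih]
      · simp [pvStepA, pvStepM, h, ih]

theorem pvMerge_complete (frags : List (List Char))
    (hf : ∀ t ∈ frags, t ≠ [] ∧ pvGoodL t ∧ pvGoodR t) :
    ∀ (n : List (List Char)) (b : List Char), pvGoodL b → pvGoodR b →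
      PySem.Chars.endswith b ['?'] = false →
      pvFinish (frags.foldl pvStepM (n, b)) = n ++ pvComplete (if b = [] then frags else b :: frags) := by
  induction frags with
  | nil =>
      intro n b _ _ hbe
      by_cases hb0 : b = []
      · simp [hb0, pvFinish, pvComplete_nil]
      · simp [pvFinish, hb0, pvComplete_single_neg hbe, PySem.Chars.join_singleton]
  | cons t frags ih =>
      intro n b hbL hbR hbe
      obtain ⟨ht0, htL, htR⟩ := hf t (List.mem_cons_self)
      have ihf : ∀ t ∈ frags, t ≠ [] ∧ pvGoodL t ∧ pvGoodR t :=
        fun x hx => hf x (List.mem_cons_of_mem _ hx)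
      have hbeNil : PySem.Chars.endswith ([] : List Char) ['?'] = false := by decide
      by_cases hb0 : b = []
      · subst hb0
        rw [List.foldl_cons]
        have hstep : pvStepM (n, []) t =
            if PySem.Chars.endswith t ['?'] then (n ++ [t], []) else (n, t) := by
          simp [pvStepM]
        cases he : PySem.Chars.endswith t ['?'] with
        | true =>
            rw [hstep, if_pos (by simp [he])]
            rw [ih ihf (n ++ [t]) [] rfl rfl hbeNil]
            simp [pvComplete_cons_pos frags he]
        | false =>
            rw [hstep, if_neg (by simp [he])]
            rw [ih ihf n t htL htR he]
            simp [ht0]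
      · have hbuf : PySem.Chars.strip (b ++ ' ' :: t) = b ++ ' ' :: t := by
          apply pvStrip_eq_self
          · exact pvGoodL_append _ hbL hb0
          · have : b ++ ' ' :: t = (b ++ [' ']) ++ t := by simp
            rw [this]
            exact pvGoodR_append _ htR ht0
        have hend : PySem.Chars.endswith (b ++ ' ' :: t) ['?'] = PySem.Chars.endswith t ['?'] := by
          have : b ++ ' ' :: t = (b ++ [' ']) ++ t := by simp
          rw [this, pvEndswith_append _ ht0]
        rw [List.foldl_cons]
        have hstep : pvStepM (n, b) t =
            if PySem.Chars.endswith (b ++ ' ' :: t) ['?'] then (n ++ [b ++ ' ' :: t], [])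
            else (n, b ++ ' ' :: t) := by
          simp [pvStepM, hb0, hbuf]
        cases he : PySem.Chars.endswith t ['?'] with
        | true =>
            rw [hstep, hend, if_pos (by simp [he])]
            rw [ih ihf (n ++ [b ++ ' ' :: t]) [] rfl rfl hbeNil]
            rw [if_neg hb0, pvComplete_cons_neg_pos frags hbe he]
            simp [PySem.Chars.join_cons_cons, PySem.Chars.join_singleton]
        | false =>
            rw [hstep, hend, if_neg (by simp [he])]
            have hbt0 : b ++ ' ' :: t ≠ [] := by simp
            rw [ih ihf n (b ++ ' ' :: t) (pvGoodL_append _ hbL hb0)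
              (by have : b ++ ' ' :: t = (b ++ [' ']) ++ t := by simp
                  rw [this]; exact pvGoodR_append _ htR ht0)
              (by rw [hend]; exact he)]
            rw [if_neg hbt0, if_neg hb0]
            rw [pvComplete_merge frags hbe he (by rw [hend]; exact he)]

theorem pvSetContains_keys (d : PySem.Dict (List Char) (List Char)) (k : List Char) :
    PySem.Set.contains (d.keys) k = d.contains k := by
  rw [Bool.eq_iff_iff]
  constructor
  · intro h
    exact (PySem.Dict.contains_iff_mem_keys d k).mpr (by simpa [PySem.Set.contains] using h)
  · intro h
    simpa [PySem.Set.contains] using (PySem.Dict.contains_iff_mem_keys d k).mp h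

theorem pvValues_insert_of_not_contains (d : PySem.Dict (List Char) (List Char))
    {k : List Char} (v : List Char) (h : d.contains k = false) :
    (d.insert k v).values = d.values ++ [v] := by
  simp [PySem.Dict.values, PySem.Dict.items_insert_of_not_contains d v h]

-- the two dedup loops agree (result list = dict values, seen set = dict keys)
theorem pvDedup_eq (qs : List (List Char)) :
    ∀ (r : List (List Char)) (d : PySem.Dict (List Char) (List Char)),
      qs.foldl pvDedupA (r ++ d.values, d.keys) =
        (r ++ (qs.foldl pvDedupB d).values, (qs.foldl pvDedupB d).keys) := by
  induction qs with
  | nil => intro r d; rfl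
  | cons q qs ih =>
      intro r d
      rw [List.foldl_cons, List.foldl_cons]
      by_cases hc : pvKey q ≠ [] ∧ d.contains (pvKey q) = false
      · have hcs : PySem.Set.contains d.keys (pvKey q) = false := by
          rw [pvSetContains_keys]; exact hc.2
        have hA : pvDedupA (r ++ d.values, d.keys) q =
            (r ++ (d.insert (pvKey q) q).values, (d.insert (pvKey q) q).keys) := by
          show (if pvKey q ≠ [] ∧ PySem.Set.contains d.keys (pvKey q) = false
              then (r ++ d.values ++ [q], PySem.Set.add d.keys (pvKey q))
              else (r ++ d.values, d.keys)) = _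
          rw [if_pos ⟨hc.1, hcs⟩]
          rw [pvValues_insert_of_not_contains d q hc.2,
            PySem.Dict.keys_insert_of_not_contains d q hc.2]
          rw [show PySem.Set.add d.keys (pvKey q) = d.keys ++ [pvKey q] from by
            rw [PySem.Set.add, hcs]; simp]
          simp
        rw [hA, pvDedupB, if_pos hc, ih]
      · have hA : pvDedupA (r ++ d.values, d.keys) q = (r ++ d.values, d.keys) := by
          show (if pvKey q ≠ [] ∧ PySem.Set.contains d.keys (pvKey q) = false
              then (r ++ d.values ++ [q], PySem.Set.add d.keys (pvKey q))
              else (r ++ d.values, d.keys)) = _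
          rw [if_neg (fun h => hc ⟨h.1, by rw [← pvSetContains_keys]; exact h.2⟩)]
        rw [hA, pvDedupB, if_neg hc, ih]

-- cleaned fragments are nonempty and strip-fixed
theorem pvFrag_good (l : List String) :
    ∀ t ∈ (l.map pvClean).filter (fun t => t ≠ []), t ≠ [] ∧ pvGoodL t ∧ pvGoodR t := by
  intro t ht
  rw [List.mem_filter] at ht
  obtain ⟨hm, hne⟩ := ht
  rw [List.mem_map] at hm
  obtain ⟨raw, _, rfl⟩ := hm
  refine ⟨by simpa using hne, ?_, ?_⟩
  · exact pvGoodL_strip _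
  · exact pvGoodR_strip _

-- ===== VERDICT (by name: the statement is the Claim_ definition above) =====
theorem normalize_question_items_py_spec : Claim_equal_normalize_question_items_py := by
  intro items _
  show normalize_question_items_py items = normalize_question_items_py_alt items
  simp only [normalize_question_items_py, normalize_question_items_py_alt]
  rw [pvFoldA_eq]
  have hmerge := pvMerge_complete (((items.getD []).map pvClean).filter (fun t => t ≠ []))
    (pvFrag_good (items.getD [])) [] [] rfl rfl (by decide)
  rw [if_pos rfl, List.nil_append] at hmerge
  simp only [pvFinish] at hmerge
  rw [hmerge]
  have hd := pvDedup_eq (pvComplete (((items.getD []).map pvClean).filter (fun t => t ≠ [])))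
    [] PySem.Dict.empty
  rw [show (([], PySem.Set.empty) : List (List Char) × PySem.Set (List Char)) =
      (([] : List (List Char)) ++ (PySem.Dict.empty (κ := List Char) (ν := List Char)).values,
        (PySem.Dict.empty (κ := List Char) (ν := List Char)).keys) from rfl]
  rw [hd]
  simp
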